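-- pv_equiv track=rewrite | github.com/xuefenghao5121/PTO-Gromacs | third_party/pto-isa/tests/validate_testcase_names.py | parse_test_f_call
-- ===== SOURCE A (Python) =====
-- from typing import Dict, List, Optional, Set, Tuple
--
-- def parse_test_f_call(content: str, start_pos: int) -> Optional[Tuple[str, str]]:
--     """
--     Parse a TEST_F macro call and extract suite and case names.
--
--     Args:
--         content: Source content
--         start_pos: Position right after "TEST_F("
--
--     Returns:
--         Tuple of (suite_name, case_name) or None if parsing fails
--     """
--     # Find matching closing parenthesis
--     paren_count = 1
--     i = start_pos
--
--     while i < len(content) and paren_count > 0: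
--         if content[i] == "(":
--             paren_count += 1
--         elif content[i] == ")":
--             paren_count -= 1
--         i += 1
--
--     if paren_count != 0:
--         return None
--
--     inner = content[start_pos : i - 1]
--
--     # Split by comma at top level (not inside nested parentheses)
--     paren_depth = 0
--     split_pos = -1
--
--     for j, ch in enumerate(inner):
--         if ch == "(":
--             paren_depth += 1
--         elif ch == ")":
--             paren_depth -= 1
--         elif ch == "," and paren_depth == 0:
--             split_pos = j
--             break
--
--     if split_pos < 0:
--         return None
--
--     suite = inner[:split_pos].strip()
--     case = inner[split_pos + 1 :].strip()
--
--     return suite, case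
-- ===== SOURCE B (Python) =====
-- def parse_test_f_call(content, start_pos):
--     """Single linear scan: one depth counter, record the first top-level comma,
--     stop at the matching close parenthesis."""
--     depth = 1
--     split = -1
--     for i in range(start_pos, len(content)):
--         ch = content[i]
--         if ch == "(":
--             depth += 1
--         elif ch == ")":
--             depth -= 1
--             if depth == 0:
--                 if split < 0:
--                     return None
--                 return content[start_pos:split].strip(), content[split + 1 : i].strip()
--         elif ch == "," and depth == 1 and split < 0:
--             split = i
--     return None
-- ===== Notes on version B (the rewrite author's own statement) =====
-- stated objective: faster
-- what changed: Replaces A's two passes (scan for the matching close parenthesis, slice out the inner text, then re-scan that slice for the top-level comma) by a single linear scan that keeps one depth counter, records the first depth-1 comma position, and stops at the matching close, so the inner slice and second pass disappear.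
-- outside the precondition, e.g. on parse_test_f_call(')a,)(', -1): A returns None, B returns ('', ''); on parse_test_f_call('a,b)', -10): A raises IndexError, B raises IndexError
import Mathlib
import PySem

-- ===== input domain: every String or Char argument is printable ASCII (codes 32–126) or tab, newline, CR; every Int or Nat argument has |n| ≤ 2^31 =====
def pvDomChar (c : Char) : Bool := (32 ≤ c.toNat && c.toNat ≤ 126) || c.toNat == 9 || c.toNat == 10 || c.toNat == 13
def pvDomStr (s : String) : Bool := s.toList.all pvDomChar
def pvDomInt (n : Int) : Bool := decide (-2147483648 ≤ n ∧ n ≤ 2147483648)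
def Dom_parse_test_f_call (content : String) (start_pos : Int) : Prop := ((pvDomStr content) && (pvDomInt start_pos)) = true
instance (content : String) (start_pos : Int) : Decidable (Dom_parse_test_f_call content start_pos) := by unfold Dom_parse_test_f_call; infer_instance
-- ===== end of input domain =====

-- B replaces A's two passes (find the matching close, then re-scan the inner slice for the
-- top-level comma) by ONE linear scan that tracks the depth and records the first depth-1 comma.

-- ===== PORT A =====
-- phase 1: `while i < len(content) and paren_count > 0: …` (pyGet? none = IndexError, unreachable under Pre_)
def pvAFind (cs : List Char) (pc : Int) (i : Int) : Int × Int :=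
  if _h : i < (cs.length : Int) ∧ 0 < pc then
    match PySem.List.pyGet? cs i with
    | none => (pc, i)   -- Python would raise IndexError here (negative i below -len); excluded by Pre_
    | some c =>
        let pc' := if c = '(' then pc + 1 else if c = ')' then pc - 1 else pc
        pvAFind cs pc' (i + 1)
  else (pc, i)
termination_by ((cs.length : Int) - i).toNat
decreasing_by omega

-- phase 2: `for j, ch in enumerate(inner): …` with sentinel split_pos = -1
def pvASplit (l : List Char) (depth : Int) (j : Int) : Int :=
  match l with
  | [] => -1
  | c :: r =>
      if c = '(' then pvASplit r (depth + 1) (j + 1)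
      else if c = ')' then pvASplit r (depth - 1) (j + 1)
      else if c = ',' ∧ depth = 0 then j
      else pvASplit r depth (j + 1)

def parse_test_f_call (content : String) (start_pos : Int) : Option (String × String) :=
  let cs := content.toList
  let r := pvAFind cs 1 start_pos
  if r.1 ≠ 0 then none
  else
    let inner := PySem.List.slice cs (some start_pos) (some (r.2 - 1))
    let sp := pvASplit inner 0 0
    if sp < 0 then none
    else
      some (String.ofList (PySem.Chars.strip (PySem.List.slice inner none (some sp))),
            String.ofList (PySem.Chars.strip (PySem.List.slice inner (some (sp + 1)) none)))

-- ===== PORT B =====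
-- one pass: depth counter, first top-level comma recorded in `split` (sentinel -1), stop at depth 0
def pvBScan (cs : List Char) (start : Int) (depth : Int) (split : Int) (i : Int) : Option (String × String) :=
  if _h : i < (cs.length : Int) then
    match PySem.List.pyGet? cs i with
    | none => none   -- Python would raise IndexError here (negative i); unreachable for 0 ≤ start
    | some c =>
        if c = '(' then pvBScan cs start (depth + 1) split (i + 1)
        else if c = ')' then
          if depth - 1 = 0 then
            if split < 0 then none
            else
              some (String.ofList (PySem.Chars.strip (PySem.List.slice cs (some start) (some split))),
                    String.ofList (PySem.Chars.strip (PySem.List.slice cs (some (split + 1)) (some i))))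
          else pvBScan cs start (depth - 1) split (i + 1)
        else if c = ',' ∧ depth = 1 ∧ split < 0 then pvBScan cs start depth i (i + 1)
        else pvBScan cs start depth split (i + 1)
  else none
termination_by ((cs.length : Int) - i).toNat
decreasing_by all_goals omega

def parse_test_f_call_alt (content : String) (start_pos : Int) : Option (String × String) :=
  pvBScan content.toList start_pos 1 (-1) start_pos

-- ===== PRECONDITION & SPEC =====
-- Pre_ restricts start_pos to the function's natural domain (a position right after "TEST_F(",
-- hence ≥ 0): for start_pos < -len(content) A raises IndexError, and for the remaining negative
-- start_pos A's scan proceeds by Python's negative-index wraparound and then re-slices across the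
-- sign boundary — an accident of indexing neither program needs to share.
def Pre_parse_test_f_call (content : String) (start_pos : Int) : Prop := 0 ≤ start_pos
instance (content : String) (start_pos : Int) : Decidable (Pre_parse_test_f_call content start_pos) := by
  unfold Pre_parse_test_f_call; infer_instance

def pvWitness_parse_test_f_call : String × Int := ("MySuite, my_case) {", 0)

def Spec_parse_test_f_call (content : String) (start_pos : Int) (out : Option (String × String)) : Prop := out = parse_test_f_call_alt content start_pos
instance (content : String) (start_pos : Int) (out : Option (String × String)) : Decidable (Spec_parse_test_f_call content start_pos out) := by unfold Spec_parse_test_f_call; infer_instance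

-- ===== CLAIM (what is proved, stated in full; the proofs are below) =====
def Claim_equal_parse_test_f_call : Prop := ∀ (content : String) (start_pos : Int), Dom_parse_test_f_call content start_pos → Pre_parse_test_f_call content start_pos → Spec_parse_test_f_call content start_pos (parse_test_f_call content start_pos)

-- ===== LEMMAS AND PROOFS =====

-- proof-side view of phase 1: (final count, number of characters consumed) over the suffix
def pvDelta (c : Char) (pc : Int) : Int :=
  if c = '(' then pc + 1 else if c = ')' then pc - 1 else pc

def pvScan1 (l : List Char) (pc : Int) : Int × Nat :=
  match l with
  | [] => (pc, 0)
  | c :: r =>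
      if pvDelta c pc = 0 then (0, 1)
      else ((pvScan1 r (pvDelta c pc)).1, (pvScan1 r (pvDelta c pc)).2 + 1)

-- proof-side view of phase 2: offset of the first depth-0 comma
def pvSplitL (l : List Char) (depth : Int) : Option Nat :=
  match l with
  | [] => none
  | c :: r =>
      if c = '(' then (pvSplitL r (depth + 1)).map (· + 1)
      else if c = ')' then (pvSplitL r (depth - 1)).map (· + 1)
      else if c = ',' ∧ depth = 0 then some 0
      else (pvSplitL r depth).map (· + 1)

lemma pvScan1_pos (l : List Char) (pc : Int) (hpc : pc ≠ 0) (h0 : (pvScan1 l pc).1 = 0) :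
    1 ≤ (pvScan1 l pc).2 := by
  cases l with
  | nil => exact absurd h0 (by simpa [pvScan1] using hpc)
  | cons c r => simp only [pvScan1]; split <;> simp

lemma pvSplitL_lt_length (l : List Char) (d : Int) (t : Nat) (h : pvSplitL l d = some t) :
    t < l.length := by
  induction l generalizing d t with
  | nil => simp [pvSplitL] at h
  | cons c r ih =>
      simp only [pvSplitL] at h
      split_ifs at h with h1 h2 h3
      · rcases Option.map_eq_some_iff.mp h with ⟨t', ht', rfl⟩
        have := ih _ _ ht'; simp; omega
      · rcases Option.map_eq_some_iff.mp h with ⟨t', ht', rfl⟩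
        have := ih _ _ ht'; simp; omega
      · cases h; simp
      · rcases Option.map_eq_some_iff.mp h with ⟨t', ht', rfl⟩
        have := ih _ _ ht'; simp; omega

lemma pv_drop_head {cs r : List Char} {c : Char} {n : Nat} (h : cs.drop n = c :: r) :
    cs[n]? = some c ∧ cs.drop (n + 1) = r := by
  constructor
  · have h0 : (cs.drop n)[0]? = cs[n + 0]? := List.getElem?_drop
    simpa [h] using h0.symm
  · have h1 : cs.drop (n + 1) = (cs.drop n).drop 1 := by rw [List.drop_drop]
    simp [h1, h]

lemma pv_drop_len {cs : List Char} {i : Int} (hi : 0 ≤ i) (h : ([] : List Char) = cs.drop i.toNat) :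
    (cs.length : Int) ≤ i := by
  have h0 := congrArg List.length h
  simp only [List.length_nil, List.length_drop] at h0
  omega

lemma pvAFind_eq (l : List Char) : ∀ (cs : List Char) (i pc : Int), 0 ≤ i →
    l = cs.drop i.toNat → 1 ≤ pc →
    pvAFind cs pc i = ((pvScan1 l pc).1, i + (pvScan1 l pc).2) := by
  induction l with
  | nil =>
      intro cs i pc hi hdrop hpc
      have hlen := pv_drop_len hi hdrop
      rw [pvAFind, dif_neg (by omega)]
      simp [pvScan1]
  | cons c r ih =>
      intro cs i pc hi hdrop hpc
      obtain ⟨hget, hdrop'⟩ := pv_drop_head hdrop.symm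
      have hlen : i < (cs.length : Int) := by
        obtain ⟨h3, -⟩ := List.getElem?_eq_some_iff.mp hget
        omega
      have hgetI : PySem.List.pyGet? cs i = some c := by
        have h2 : PySem.List.pyGet? cs ((i.toNat : Nat) : Int) = cs[i.toNat]? :=
          PySem.List.pyGet?_natCast cs i.toNat
        rw [show ((i.toNat : Nat) : Int) = i by omega] at h2
        rw [h2, hget]
      have hdropN : r = cs.drop (i + 1).toNat := by
        rw [show (i + 1).toNat = i.toNat + 1 by omega, hdrop']
      rw [pvAFind, dif_pos ⟨hlen, by omega⟩]
      simp only [hgetI]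
      rw [show (if c = '(' then pc + 1 else if c = ')' then pc - 1 else pc) = pvDelta c pc from rfl]
      by_cases hz : pvDelta c pc = 0
      · rw [pvAFind, dif_neg (by rw [hz]; omega)]
        simp only [pvScan1, if_pos hz]
        rw [hz]
        norm_num
      · have hpc1 : 1 ≤ pvDelta c pc := by
          have : pvDelta c pc = pc + 1 ∨ pvDelta c pc = pc - 1 ∨ pvDelta c pc = pc := by
            unfold pvDelta; split_ifs <;> simp
          omega
        rw [ih cs (i + 1) (pvDelta c pc) (by omega) hdropN hpc1]
        simp only [pvScan1, if_neg hz, Prod.mk.injEq]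
        exact ⟨by trivial, by push_cast; ring⟩

lemma pvASplit_eq (l : List Char) : ∀ (d j : Int),
    pvASplit l d j = (match pvSplitL l d with | none => -1 | some t => j + t) := by
  induction l with
  | nil => intro d j; simp [pvASplit, pvSplitL]
  | cons c r ih =>
      intro d j
      simp only [pvASplit, pvSplitL]
      split_ifs with h1 h2 h3
      · rw [ih]; cases pvSplitL r (d + 1) <;> simp <;> push_cast <;> ring
      · rw [ih]; cases pvSplitL r (d - 1) <;> simp <;> push_cast <;> ring
      · simp
      · rw [ih]; cases pvSplitL r d <;> simp <;> push_cast <;> ring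

-- single-scan loop of B, characterized by the two proof-side views of A's phases
lemma pvBScan_eq (l : List Char) : ∀ (cs : List Char) (start i d s : Int),
    0 ≤ start → start ≤ i → l = cs.drop i.toNat → 1 ≤ d →
    pvBScan cs start d s i =
      (if (pvScan1 l d).1 = 0 then
        (if s < 0 then
          (pvSplitL (l.take ((pvScan1 l d).2 - 1)) (d - 1)).map (fun (t : Nat) =>
            (String.ofList (PySem.Chars.strip (PySem.List.slice cs (some start) (some (i + (t : Int))))),
             String.ofList (PySem.Chars.strip (PySem.List.slice cs (some (i + (t : Int) + 1)) (some (i + (pvScan1 l d).2 - 1))))))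
        else
          some (String.ofList (PySem.Chars.strip (PySem.List.slice cs (some start) (some s))),
                String.ofList (PySem.Chars.strip (PySem.List.slice cs (some (s + 1)) (some (i + (pvScan1 l d).2 - 1))))))
      else none) := by
  induction l with
  | nil =>
      intro cs start i d s hs hsi hdrop hd
      have hlen := pv_drop_len (by omega) hdrop
      rw [pvBScan, dif_neg (by omega)]
      have h1 : (pvScan1 ([] : List Char) d).1 = d := rfl
      rw [h1, if_neg (by omega)]
  | cons c r ih =>
      intro cs start i d s hs hsi hdrop hd
      obtain ⟨hget, hdrop'⟩ := pv_drop_head hdrop.symm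
      have hlen : i < (cs.length : Int) := by
        obtain ⟨h3, -⟩ := List.getElem?_eq_some_iff.mp hget
        omega
      have hgetI : PySem.List.pyGet? cs i = some c := by
        have h2 : PySem.List.pyGet? cs ((i.toNat : Nat) : Int) = cs[i.toNat]? :=
          PySem.List.pyGet?_natCast cs i.toNat
        rw [show ((i.toNat : Nat) : Int) = i by omega] at h2
        rw [h2, hget]
      have hdropN : r = cs.drop (i + 1).toNat := by
        rw [show (i + 1).toNat = i.toNat + 1 by omega, hdrop']
      rw [pvBScan, dif_pos hlen]
      simp only [hgetI]
      by_cases hop : c = '('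
      · -- '(' : depth goes up
        have hδ : pvDelta c d = d + 1 := by simp [pvDelta, hop]
        have hS : pvScan1 (c :: r) d =
            ((pvScan1 r (d + 1)).1, (pvScan1 r (d + 1)).2 + 1) := by
          simp only [pvScan1, hδ]; rw [if_neg (by omega)]
        have hS1 : (pvScan1 (c :: r) d).1 = (pvScan1 r (d + 1)).1 := by rw [hS]
        have hS2 : (pvScan1 (c :: r) d).2 = (pvScan1 r (d + 1)).2 + 1 := by rw [hS]
        rw [if_pos hop, ih cs start (i + 1) (d + 1) s hs (by omega) hdropN (by omega),
          hS1, hS2]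
        by_cases hq : (pvScan1 r (d + 1)).1 = 0
        · rw [if_pos hq, if_pos hq]
          by_cases hneg : s < 0
          · rw [if_pos hneg, if_pos hneg]
            have hk1 : 1 ≤ (pvScan1 r (d + 1)).2 := pvScan1_pos r (d + 1) (by omega) hq
            set k := (pvScan1 r (d + 1)).2 with hk
            have htake : (c :: r).take (k + 1 - 1) = c :: r.take (k - 1) := by
              rw [show k + 1 - 1 = (k - 1) + 1 by omega]
              rfl
            rw [htake, hop,
              show pvSplitL ('(' :: List.take (k - 1) r) (d - 1) =
                (pvSplitL (List.take (k - 1) r) (d - 1 + 1)).map (· + 1) by simp [pvSplitL],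
              show d - 1 + 1 = d by ring, show d + 1 - 1 = d by ring, Option.map_map]
            congr 1
            funext t
            simp only [Function.comp_apply]
            rw [show i + ((t + 1 : Nat) : Int) = i + 1 + t by push_cast; ring,
              show i + ((k + 1 : Nat) : Int) - 1 = i + 1 + (k : Int) - 1 by push_cast; ring]
          · rw [if_neg hneg, if_neg hneg,
              show i + (((pvScan1 r (d + 1)).2 + 1 : Nat) : Int) - 1 =
                i + 1 + ((pvScan1 r (d + 1)).2 : Int) - 1 by push_cast; ring]
        · rw [if_neg hq, if_neg hq]
      · rw [if_neg hop]
        by_cases hcl : c = ')'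
        · have hδ : pvDelta c d = d - 1 := by simp [pvDelta, hcl]
          rw [if_pos hcl]
          by_cases hone : d - 1 = 0
          · -- the matching close parenthesis
            rw [if_pos hone]
            have hS : pvScan1 (c :: r) d = (0, 1) := by
              simp only [pvScan1, hδ]; rw [if_pos hone]
            have hS1 : (pvScan1 (c :: r) d).1 = 0 := by rw [hS]
            have hS2 : (pvScan1 (c :: r) d).2 = 1 := by rw [hS]
            rw [hS1, hS2, if_pos rfl,
              show i + ((1 : Nat) : Int) - 1 = i by push_cast; ring]
            by_cases hneg : s < 0
            · rw [if_pos hneg, if_pos hneg]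
              simp [pvSplitL]
            · rw [if_neg hneg, if_neg hneg]
          · -- a nested close: depth goes down
            rw [if_neg hone]
            have hS : pvScan1 (c :: r) d =
                ((pvScan1 r (d - 1)).1, (pvScan1 r (d - 1)).2 + 1) := by
              simp only [pvScan1, hδ]; rw [if_neg hone]
            have hS1 : (pvScan1 (c :: r) d).1 = (pvScan1 r (d - 1)).1 := by rw [hS]
            have hS2 : (pvScan1 (c :: r) d).2 = (pvScan1 r (d - 1)).2 + 1 := by rw [hS]
            rw [ih cs start (i + 1) (d - 1) s hs (by omega) hdropN (by omega), hS1, hS2]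
            by_cases hq : (pvScan1 r (d - 1)).1 = 0
            · rw [if_pos hq, if_pos hq]
              by_cases hneg : s < 0
              · rw [if_pos hneg, if_pos hneg]
                have hk1 : 1 ≤ (pvScan1 r (d - 1)).2 := pvScan1_pos r (d - 1) (by omega) hq
                set k := (pvScan1 r (d - 1)).2 with hk
                have htake : (c :: r).take (k + 1 - 1) = c :: r.take (k - 1) := by
                  rw [show k + 1 - 1 = (k - 1) + 1 by omega]
                  rfl
                rw [htake, hcl,
                  show pvSplitL (')' :: List.take (k - 1) r) (d - 1) =
                    (pvSplitL (List.take (k - 1) r) (d - 1 - 1)).map (· + 1) by simp [pvSplitL],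
                  Option.map_map]
                congr 1
                funext t
                simp only [Function.comp_apply]
                rw [show i + ((t + 1 : Nat) : Int) = i + 1 + t by push_cast; ring,
                  show i + ((k + 1 : Nat) : Int) - 1 = i + 1 + (k : Int) - 1 by push_cast; ring]
              · rw [if_neg hneg, if_neg hneg,
                  show i + (((pvScan1 r (d - 1)).2 + 1 : Nat) : Int) - 1 =
                    i + 1 + ((pvScan1 r (d - 1)).2 : Int) - 1 by push_cast; ring]
            · rw [if_neg hq, if_neg hq]
        · -- an ordinary character (possibly a comma)
          rw [if_neg hcl]
          have hδ : pvDelta c d = d := by simp [pvDelta, hop, hcl]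
          have hS : pvScan1 (c :: r) d =
              ((pvScan1 r d).1, (pvScan1 r d).2 + 1) := by
            simp only [pvScan1, hδ]; rw [if_neg (by omega)]
          have hS1 : (pvScan1 (c :: r) d).1 = (pvScan1 r d).1 := by rw [hS]
          have hS2 : (pvScan1 (c :: r) d).2 = (pvScan1 r d).2 + 1 := by rw [hS]
          by_cases hcomma : c = ',' ∧ d = 1 ∧ s < 0
          · -- the first top-level comma: record it
            rw [if_pos hcomma]
            obtain ⟨hc, hd1, hneg⟩ := hcomma
            rw [ih cs start (i + 1) d i hs (by omega) hdropN hd, hS1, hS2]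
            by_cases hq : (pvScan1 r d).1 = 0
            · rw [if_pos hq, if_pos hq, if_neg (show ¬ (i < 0) by omega), if_pos hneg]
              have hk1 : 1 ≤ (pvScan1 r d).2 := pvScan1_pos r d (by omega) hq
              set k := (pvScan1 r d).2 with hk
              have htake : (c :: r).take (k + 1 - 1) = c :: r.take (k - 1) := by
                rw [show k + 1 - 1 = (k - 1) + 1 by omega]
                rfl
              rw [htake]
              simp only [pvSplitL, if_neg hop, if_neg hcl,
                if_pos (show c = ',' ∧ d - 1 = 0 from ⟨hc, by omega⟩), Option.map_some]
              rw [show i + ((0 : Nat) : Int) = i by push_cast; ring,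
                show i + ((k + 1 : Nat) : Int) - 1 = i + 1 + (k : Int) - 1 by push_cast; ring]
            · rw [if_neg hq, if_neg hq]
          · -- nothing changes
            rw [if_neg hcomma]
            rw [ih cs start (i + 1) d s hs (by omega) hdropN hd, hS1, hS2]
            by_cases hq : (pvScan1 r d).1 = 0
            · rw [if_pos hq, if_pos hq]
              by_cases hneg : s < 0
              · rw [if_pos hneg, if_pos hneg]
                have hk1 : 1 ≤ (pvScan1 r d).2 := pvScan1_pos r d (by omega) hq
                set k := (pvScan1 r d).2 with hk
                have htake : (c :: r).take (k + 1 - 1) = c :: r.take (k - 1) := by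
                  rw [show k + 1 - 1 = (k - 1) + 1 by omega]
                  rfl
                rw [htake]
                have hnc : ¬ (c = ',' ∧ d - 1 = 0) := by
                  rintro ⟨h1, h2⟩
                  exact hcomma ⟨h1, by omega, hneg⟩
                simp only [pvSplitL, if_neg hop, if_neg hcl, if_neg hnc, Option.map_map]
                congr 1
                funext t
                simp only [Function.comp_apply]
                rw [show i + ((t + 1 : Nat) : Int) = i + 1 + t by push_cast; ring,
                  show i + ((k + 1 : Nat) : Int) - 1 = i + 1 + (k : Int) - 1 by push_cast; ring]
              · rw [if_neg hneg, if_neg hneg,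
                  show i + (((pvScan1 r d).2 + 1 : Nat) : Int) - 1 =
                    i + 1 + ((pvScan1 r d).2 : Int) - 1 by push_cast; ring]
            · rw [if_neg hq, if_neg hq]

-- ===== VERDICT (by name: the statement is the Claim_ definition above) =====
theorem parse_test_f_call_spec : Claim_equal_parse_test_f_call := by
  intro content start_pos _hDom hPre
  unfold Spec_parse_test_f_call
  have hs : (0 : Int) ≤ start_pos := hPre
  simp only [parse_test_f_call, parse_test_f_call_alt]
  set cs := content.toList with hcs
  set l := cs.drop start_pos.toNat with hl
  have hfind := pvAFind_eq l cs start_pos 1 hs hl (by norm_num)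
  have hq1 : (pvAFind cs 1 start_pos).1 = (pvScan1 l 1).1 := by rw [hfind]
  have hq2 : (pvAFind cs 1 start_pos).2 = start_pos + (pvScan1 l 1).2 := by rw [hfind]
  rw [pvBScan_eq l cs start_pos start_pos 1 (-1) hs le_rfl hl (by norm_num), hq1, hq2]
  by_cases hq : (pvScan1 l 1).1 = 0
  · rw [if_neg (show ¬ ((pvScan1 l 1).1 ≠ 0) from fun h => h hq), if_pos hq,
      if_pos (show (-1 : Int) < 0 by norm_num)]
    have hk1 : 1 ≤ (pvScan1 l 1).2 := pvScan1_pos l 1 one_ne_zero hq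
    set k := (pvScan1 l 1).2 with hk
    have hinner : PySem.List.slice cs (some start_pos) (some (start_pos + (k : Int) - 1)) =
        l.take (k - 1) := by
      rw [PySem.List.slice_toNat cs hs (by omega), hl]
      congr 1
      omega
    rw [hinner, pvASplit_eq (l.take (k - 1)) 0 0,
      show (1 : Int) - 1 = 0 by ring]
    cases h : pvSplitL (l.take (k - 1)) 0 with
    | none => simp
    | some t =>
        have ht : t < (l.take (k - 1)).length := pvSplitL_lt_length _ _ _ h
        have ht' : t < k - 1 := by
          have := (List.length_take ..).symm.trans_gt ht
          omega
        simp only [if_neg (show ¬ ((0 : Int) + (t : Int) < 0) by omega), Option.map_some]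
        have hsuite : PySem.List.slice (l.take (k - 1)) none (some ((0 : Int) + (t : Int))) =
            PySem.List.slice cs (some start_pos) (some (start_pos + (t : Int))) := by
          rw [PySem.List.slice_to _ (by omega), PySem.List.slice_toNat cs hs (by omega), hl,
            List.take_take]
          congr 1
          omega
        have hcase : PySem.List.slice (l.take (k - 1)) (some ((0 : Int) + (t : Int) + 1)) none =
            PySem.List.slice cs (some (start_pos + (t : Int) + 1)) (some (start_pos + (k : Int) - 1)) := by
          rw [PySem.List.slice_from _ (by omega), PySem.List.slice_toNat cs (by omega) (by omega), hl,
            show ((0 : Int) + (t : Int) + 1).toNat = t + 1 by omega, List.drop_take,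
            List.drop_drop]
          congr 1 <;> first | omega | (congr 1 <;> omega)
        rw [hsuite, hcase]
  · rw [if_pos (show (pvScan1 l 1).1 ≠ 0 from hq), if_neg hq]
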